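-- pv_equiv track=rewrite | github.com/MikeStorms/Thesis | help_funcs.py | linewise_edges_map
-- ===== SOURCE A (Python) =====
-- def linewise_edges_map(spatial_map, FX, FY):
--     x_check = 1
--     y_check = FX
--     layer_linewise_edge = [[0 for i in range(len(spatial_map[0]))] for j in range(len(spatial_map))]
--     if (FX == 1) & (FY == 1):
--         return []
--     if FX == 1:
--         x_check = 0
--         y_check = 1
--     if FY == 1:
--         y_check = 0
--     for iy in range(len(spatial_map)):
--         for ix in range(len(spatial_map[0])):
--             if spatial_map[iy][ix] == 1:
--                 x_valid = 0
--                 y_valid = 0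
--                 if x_check:
--                     if spatial_map[iy][ix - 1] == 1:
--                         x_valid = 1
--                 else:
--                     x_valid = 1
--                 if y_check != 0:
--                     if (y_check > 1) & (ix > len(spatial_map[0]) - FX):
--                         y_check_adjusted = len(spatial_map[0]) - ix
--                     else:
--                         y_check_adjusted = y_check
--                     for ex in range(y_check_adjusted):
--                         if spatial_map[iy - 1][ix + ex] == 1:
--                             y_valid = 1
--                 else:
--                     y_valid = 1
--                 if not(x_valid & y_valid):
--                     layer_linewise_edge[iy][ix] = 1
--
--     return layer_linewise_edge
-- ===== SOURCE B (Python) =====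
-- def linewise_edges_map(spatial_map, FX, FY):
--     if FX == 1 and FY == 1:
--         return []
--     rows = len(spatial_map)
--     cols = len(spatial_map[0]) if spatial_map else 0
--     x_check = 0 if FX == 1 else 1
--     y_check = 0 if FY == 1 else (1 if FX == 1 else FX)
--     out = []
--     for iy in range(rows):
--         above = spatial_map[iy - 1]
--         pref = [0]
--         acc = 0
--         for j in range(cols):
--             acc += 1 if above[j] == 1 else 0
--             pref.append(acc)
--         row = spatial_map[iy]
--         new = []
--         for ix in range(cols):
--             if row[ix] != 1:
--                 new.append(0)
--                 continue
--             left_ok = x_check == 0 or row[ix - 1] == 1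
--             if y_check == 0:
--                 up_ok = True
--             else:
--                 w = cols - ix if y_check > 1 and ix > cols - FX else y_check
--                 up_ok = w > 0 and pref[ix + w] - pref[ix] > 0
--             new.append(0 if left_ok and up_ok else 1)
--         out.append(new)
--     return out
-- ===== Notes on version B (the rewrite author's own statement) =====
-- stated objective: alternative
-- what changed: Per-row prefix sums of ones in the row above replace A's per-cell scan of the FX-wide window (each window test becomes one subtraction), and rows are built by append instead of in-place writes into a preallocated matrix.
import Mathlib
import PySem

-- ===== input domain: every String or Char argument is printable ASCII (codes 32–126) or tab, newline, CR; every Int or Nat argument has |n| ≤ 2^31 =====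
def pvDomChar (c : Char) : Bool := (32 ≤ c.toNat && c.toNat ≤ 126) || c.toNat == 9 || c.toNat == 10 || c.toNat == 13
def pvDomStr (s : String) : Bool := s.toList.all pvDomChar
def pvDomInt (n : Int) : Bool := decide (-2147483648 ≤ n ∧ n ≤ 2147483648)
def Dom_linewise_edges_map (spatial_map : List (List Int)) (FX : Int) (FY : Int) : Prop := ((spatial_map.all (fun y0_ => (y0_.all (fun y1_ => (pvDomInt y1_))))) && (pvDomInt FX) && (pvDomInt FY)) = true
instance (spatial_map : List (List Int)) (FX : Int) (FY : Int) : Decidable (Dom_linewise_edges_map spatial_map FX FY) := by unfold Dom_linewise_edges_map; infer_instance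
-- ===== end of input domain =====

-- B replaces A's per-cell scan of the FX-wide window in the row above by per-row prefix
-- sums of ones: each window test becomes one subtraction (an alternative algorithm of
-- similar measured cost).

-- ===== PORT A =====
def linewise_edges_map (spatial_map : List (List Int)) (FX : Int) (FY : Int) : List (List Int) :=
  let x_check : Int := 1
  let y_check : Int := FX
  let cols : Int := ((spatial_map.headD []).length : Int)
  let layer : List (List Int) :=
    spatial_map.map (fun _ => (PySem.List.pyRange 0 cols 1).map (fun _ => (0 : Int)))
  if FX == 1 && FY == 1 then [] else
  let x_check : Int := if FX == 1 then 0 else x_check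
  let y_check : Int := if FX == 1 then 1 else y_check
  let y_check : Int := if FY == 1 then 0 else y_check
  (PySem.List.pyRange 0 (spatial_map.length : Int) 1).foldl (fun layer iy =>
    (PySem.List.pyRange 0 cols 1).foldl (fun layer ix =>
      if PySem.List.pyGetD (PySem.List.pyGetD spatial_map iy []) ix 0 == 1 then
        let x_valid : Int :=
          if x_check != 0 then
            (if PySem.List.pyGetD (PySem.List.pyGetD spatial_map iy []) (ix - 1) 0 == 1 then 1 else 0)
          else 1
        let y_valid : Int :=
          if y_check != 0 then
            let y_check_adjusted : Int :=
              if y_check > 1 && ix > cols - FX then cols - ix else y_check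
            (PySem.List.pyRange 0 y_check_adjusted 1).foldl (fun yv ex =>
              if PySem.List.pyGetD (PySem.List.pyGetD spatial_map (iy - 1) []) (ix + ex) 0 == 1 then 1 else yv) 0
          else 1
        if Int.land x_valid y_valid == 0 then
          layer.set iy.toNat ((layer.getD iy.toNat []).set ix.toNat 1)
        else layer
      else layer) layer) layer

-- ===== PORT B =====
def linewise_edges_map_alt (spatial_map : List (List Int)) (FX : Int) (FY : Int) : List (List Int) :=
  if FX == 1 && FY == 1 then [] else
  let rows : Int := (spatial_map.length : Int)
  let cols : Int := ((spatial_map.headD []).length : Int)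
  let x_check : Int := if FX == 1 then 0 else 1
  let y_check : Int := if FY == 1 then 0 else if FX == 1 then 1 else FX
  (PySem.List.pyRange 0 rows 1).foldl (fun out iy =>
    let above := PySem.List.pyGetD spatial_map (iy - 1) []
    let pa := (PySem.List.pyRange 0 cols 1).foldl (fun (pa : List Int × Int) j =>
        let acc := pa.2 + (if PySem.List.pyGetD above j 0 == 1 then 1 else 0)
        (pa.1 ++ [acc], acc)) ([0], 0)
    let pref := pa.1
    let row := PySem.List.pyGetD spatial_map iy []
    let new := (PySem.List.pyRange 0 cols 1).foldl (fun new ix =>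
      if PySem.List.pyGetD row ix 0 != 1 then new ++ [(0 : Int)] else
      let left_ok : Bool := x_check == 0 || PySem.List.pyGetD row (ix - 1) 0 == 1
      let up_ok : Bool :=
        if y_check == 0 then true
        else
          let w : Int := if y_check > 1 && ix > cols - FX then cols - ix else y_check
          decide (0 < w) && decide (0 < PySem.List.pyGetD pref (ix + w) 0 - PySem.List.pyGetD pref ix 0)
      new ++ [if left_ok && up_ok then (0 : Int) else 1]) []
    out ++ [new]) []

-- ===== PRECONDITION & SPEC =====
-- Pre_: exactly the inputs where Python A returns: every row is at least as long as the
-- first row (A indexes every row at all columns of the first row, and raises otherwise).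
def Pre_linewise_edges_map (spatial_map : List (List Int)) (FX : Int) (FY : Int) : Prop :=
  ∀ row ∈ spatial_map, (spatial_map.headD []).length ≤ row.length
instance (spatial_map : List (List Int)) (FX : Int) (FY : Int) : Decidable (Pre_linewise_edges_map spatial_map FX FY) := by unfold Pre_linewise_edges_map; infer_instance

def pvWitness_linewise_edges_map : List (List Int) × Int × Int := ([[1, 0, 1], [0, 1, 1]], 2, 2)

def Spec_linewise_edges_map (spatial_map : List (List Int)) (FX : Int) (FY : Int) (out : List (List Int)) : Prop := out = linewise_edges_map_alt spatial_map FX FY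
instance (spatial_map : List (List Int)) (FX : Int) (FY : Int) (out : List (List Int)) : Decidable (Spec_linewise_edges_map spatial_map FX FY out) := by unfold Spec_linewise_edges_map; infer_instance

-- ===== CLAIM (what is proved, stated in full; the proofs are below) =====
def Claim_equal_linewise_edges_map : Prop := ∀ (spatial_map : List (List Int)) (FX : Int) (FY : Int), Dom_linewise_edges_map spatial_map FX FY → Pre_linewise_edges_map spatial_map FX FY → Spec_linewise_edges_map spatial_map FX FY (linewise_edges_map spatial_map FX FY)
-- ===== LEMMAS AND PROOFS =====

lemma pvGetDSet (r : List Int) (a i : Nat) (v : Int) :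
    (r.set a v).getD i 0 = if a = i ∧ a < r.length then v else r.getD i 0 := by
  simp only [List.getD_eq_getElem?_getD, List.getElem?_set]
  split
  · rename_i h
    subst h
    by_cases hl : a < r.length
    · simp [hl]
    · simp [hl]
  · rename_i h
    rw [if_neg (by tauto)]

lemma pvFoldlIfOne (P : Int → Bool) (l : List Int) (init : Int) :
    l.foldl (fun yv ex => if P ex then 1 else yv) init = if l.any P then 1 else init := by
  induction l generalizing init with
  | nil => simp
  | cons a l ih => by_cases h : P a <;> simp [List.foldl_cons, h, ih]

lemma pvOverlayLen (c : Nat → Bool) (l : List Nat) (r : List Int) :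
    (l.foldl (fun r k => if c k then r.set k 1 else r) r).length = r.length := by
  induction l generalizing r with
  | nil => rfl
  | cons a l ih => by_cases h : c a <;> simp [List.foldl_cons, h, ih]

lemma pvOverlayGet (c : Nat → Bool) (l : List Nat) (r : List Int) (i : Nat) :
    (l.foldl (fun r k => if c k then r.set k 1 else r) r).getD i 0
      = if i ∈ l ∧ c i ∧ i < r.length then 1 else r.getD i 0 := by
  induction l generalizing r with
  | nil => simp
  | cons a l ih =>
    by_cases h : c a
    · rw [List.foldl_cons, if_pos h, ih, pvGetDSet]
      simp only [List.length_set, List.mem_cons]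
      by_cases hia : i = a
      · subst hia
        by_cases hl : i < r.length <;> simp_all
      · simp_all [Ne.symm hia]
    · rw [List.foldl_cons, if_neg (by simp [h]), ih]
      by_cases hia : i = a
      · subst hia; simp [h]
      · simp [List.mem_cons, hia]

lemma pvRowFold (c : Nat → Bool) (n : Nat) :
    (List.range n).foldl (fun r k => if c k then r.set k 1 else r) (List.replicate n (0:Int))
      = (List.range n).map (fun k => if c k then (1:Int) else 0) := by
  apply List.ext_getElem
  · rw [pvOverlayLen]; simp
  · intro i h1 h2
    have hi : i < n := by simpa using h2
    have := pvOverlayGet c (List.range n) (List.replicate n (0:Int)) i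
    rw [List.getD_eq_getElem _ _ h1, List.getD_eq_getElem _ _ (show i < (List.replicate n (0:Int)).length by simp [hi])] at this
    rw [this]
    simp [hi]

lemma pvSetGetDSelf (L : List (List Int)) (i : Nat) :
    L.set i (L.getD i []) = L := by
  apply List.ext_getElem
  · simp
  · intro j h1 h2
    rw [List.getElem_set]
    split
    · rename_i h; subst h; exact List.getD_eq_getElem _ _ h2
    · rfl

lemma pvInnerSet (t u : Nat → Bool) (l : List Nat) (layer : List (List Int)) (iy : Nat)
    (hiy : iy < layer.length) :
    l.foldl (fun L k => if t k then (if u k then L.set iy ((L.getD iy []).set k 1) else L) else L) layer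
      = layer.set iy (l.foldl (fun r k => if t k then (if u k then r.set k 1 else r) else r)
          (layer.getD iy [])) := by
  induction l generalizing layer with
  | nil => exact (pvSetGetDSelf layer iy).symm
  | cons a l ih =>
    by_cases ht : t a
    · by_cases hu : u a
      · rw [List.foldl_cons, if_pos ht, if_pos hu, List.foldl_cons, if_pos ht, if_pos hu]
        rw [ih _ (by simpa using hiy), List.set_set]
        congr 2
        rw [List.getD_eq_getElem _ _ (show iy < (layer.set iy ((layer.getD iy []).set a 1)).length by simpa using hiy), List.getElem_set]
        simp
      · rw [List.foldl_cons, if_pos ht, if_neg hu, List.foldl_cons, if_pos ht, if_neg hu]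
        exact ih layer hiy
    · rw [List.foldl_cons, if_neg ht, List.foldl_cons, if_neg ht]
      exact ih layer hiy

lemma pvMapGetDSelf (L : List (List Int)) :
    (List.range L.length).map (fun iy => L.getD iy []) = L := by
  apply List.ext_getElem
  · simp
  · intro i h1 h2
    simp only [List.getElem_map, List.getElem_range]
    exact List.getD_eq_getElem _ _ h2

lemma pvOuterFold (B : List (List Int) → Nat → List (List Int)) (g : Nat → List Int → List Int)
    (layer : List (List Int)) (m : Nat) (hm : m ≤ layer.length)
    (hB : ∀ L iy, L.length = layer.length → iy < m → B L iy = L.set iy (g iy (L.getD iy []))) :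
    (List.range m).foldl B layer
      = (List.range layer.length).map
          (fun iy => if iy < m then g iy (layer.getD iy []) else layer.getD iy []) := by
  induction m with
  | zero => simpa using (pvMapGetDSelf layer).symm
  | succ m ih =>
    rw [List.range_succ, List.foldl_append, List.foldl_cons, List.foldl_nil]
    rw [ih (by omega) (fun L iy hL hiy => hB L iy hL (by omega))]
    rw [hB _ m (by simp) (by omega)]
    apply List.ext_getElem
    · simp
    · intro i h1 h2
      rw [List.getElem_set]
      have hi : i < layer.length := by simpa using h2
      by_cases him : m = i
      · subst him
        rw [if_pos rfl, List.getD_eq_getElem _ _ (show m < (List.map (fun iy => if iy < m then g iy (layer.getD iy []) else layer.getD iy []) (List.range layer.length)).length by simpa using hi)]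
        simp [List.getElem_map, List.getElem_range, hi]
      · rw [if_neg him]
        simp only [List.getElem_map, List.getElem_range]
        have : (i < m) = (i < m + 1) := by
          apply propext; constructor <;> intro <;> omega
        split <;> split <;> first | rfl | omega

def pvCnt (above : List Int) (k : Nat) : Int := ((above.take k).countP (fun v => v == 1) : Int)

lemma pvCntSucc (above : List Int) (k : Nat) (h : k < above.length) :
    pvCnt above (k + 1) = pvCnt above k + (if above[k] == 1 then 1 else 0) := by
  unfold pvCnt
  rw [List.take_add, List.countP_append]
  have hd : above.drop k = above[k] :: above.drop (k+1) := List.drop_eq_getElem_cons h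
  rw [hd, List.take_succ_cons, List.take_zero]
  by_cases hv : above[k] == 1 <;> simp [hv]

lemma pvCntWindow (above : List Int) (a b : Nat) (h : a + b ≤ above.length) :
    (0 < pvCnt above (a + b) - pvCnt above a)
      ↔ ∃ k, ∃ _hk : k < b, (above[a + k]'(by omega) == (1:Int)) = true := by
  unfold pvCnt
  rw [List.take_add, List.countP_append]
  push_cast
  have hlen : ((above.drop a).take b).length = b := by
    rw [List.length_take, List.length_drop]; omega
  have hseg : ∀ (k : Nat) (hk : k < b),
      ((above.drop a).take b)[k]'(by omega) = above[a + k]'(by omega) := by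
    intro k hk
    rw [List.getElem_take, List.getElem_drop]
  constructor
  · intro hpos
    have hc : 0 < ((above.drop a).take b).countP (fun v => v == 1) := by omega
    rw [List.countP_pos_iff] at hc
    obtain ⟨x, hx, hp⟩ := hc
    rw [List.mem_iff_getElem] at hx
    obtain ⟨k, hk, hke⟩ := hx
    rw [hlen] at hk
    refine ⟨k, hk, ?_⟩
    rw [← hseg k hk, hke]
    exact hp
  · intro ⟨k, hk, hp⟩
    have hmem : above[a + k]'(by omega) ∈ (above.drop a).take b := by
      rw [List.mem_iff_getElem]
      exact ⟨k, by omega, hseg k hk⟩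
    have : 0 < ((above.drop a).take b).countP (fun v => v == 1) :=
      List.countP_pos_iff.mpr ⟨_, hmem, hp⟩
    omega

lemma pvPrefFold (above : List Int) (n : Nat) (h : n ≤ above.length) :
    (PySem.List.pyRange 0 (n:Int) 1).foldl
      (fun (pa : List Int × Int) j =>
        (pa.1 ++ [pa.2 + (if PySem.List.pyGetD above j 0 == 1 then 1 else 0)],
         pa.2 + (if PySem.List.pyGetD above j 0 == 1 then 1 else 0))) ([0], 0)
    = ((PySem.List.pyRange 0 ((n:Int)+1) 1).map (fun j => pvCnt above j.toNat), pvCnt above n) := by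
  induction n with
  | zero =>
    rw [PySem.List.pyRange_one_eq_nil (by omega)]
    rw [show ((0:Nat):Int) + 1 = 0 + 1 by norm_num, PySem.List.pyRange_one_singleton]
    simp [pvCnt]
  | succ n ih =>
    have hn : n < above.length := by omega
    have h1 : ((n+1:Nat):Int) = (n:Int)+1 := by push_cast; ring
    rw [h1, PySem.List.pyRange_one_succ_right (by positivity), List.foldl_append,
      ih (by omega), List.foldl_cons, List.foldl_nil]
    rw [show PySem.List.pyGetD above (n:Int) 0 = above[n] by
      rw [PySem.List.pyGetD_natCast, List.getD_eq_getElem _ _ hn]]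
    rw [PySem.List.pyRange_one_succ_right (by positivity : (0:Int) ≤ (n:Int)+1), List.map_append]
    refine Prod.ext ?_ ?_ <;> simp only [List.map_cons, List.map_nil]
    · congr 1
      congr 1
      rw [show ((n:Int)+1).toNat = n + 1 by omega, pvCntSucc above n hn]
    · rw [pvCntSucc above n hn]

def pvT (sm : List (List Int)) (iy k : Nat) : Bool :=
  PySem.List.pyGetD (PySem.List.pyGetD sm (iy:Int) []) (k:Int) 0 == 1

def pvYc (FX FY : Int) : Int := if FY == 1 then 0 else if FX == 1 then 1 else FX

def pvW (sm : List (List Int)) (FX FY : Int) (k : Nat) : Int :=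
  if pvYc FX FY > 1 && (k:Int) > (((sm.headD []).length : Int)) - FX then
    (((sm.headD []).length : Int)) - (k:Int)
  else pvYc FX FY

def pvXv (sm : List (List Int)) (FX : Int) (iy k : Nat) : Int :=
  if (if FX == 1 then (0:Int) else 1) != 0 then
    (if PySem.List.pyGetD (PySem.List.pyGetD sm (iy:Int) []) ((k:Int) - 1) 0 == 1 then 1 else 0)
  else 1

def pvYv (sm : List (List Int)) (FX FY : Int) (iy k : Nat) : Int :=
  if pvYc FX FY != 0 then
    (PySem.List.pyRange 0 (pvW sm FX FY k) 1).foldl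
      (fun yv ex =>
        if PySem.List.pyGetD (PySem.List.pyGetD sm ((iy:Int) - 1) []) ((k:Int) + ex) 0 == 1 then 1
        else yv) 0
  else 1

def pvU (sm : List (List Int)) (FX FY : Int) (iy k : Nat) : Bool :=
  Int.land (pvXv sm FX iy k) (pvYv sm FX FY iy k) == 0

def pvPref (sm : List (List Int)) (iy : Nat) : List Int :=
  (PySem.List.pyRange 0 (((sm.headD []).length : Int) + 1) 1).map
    (fun j => pvCnt (PySem.List.pyGetD sm ((iy:Int) - 1) []) j.toNat)

def pvCellB (sm : List (List Int)) (FX FY : Int) (iy k : Nat) : Int :=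
  if PySem.List.pyGetD (PySem.List.pyGetD sm (iy:Int) []) (k:Int) 0 != 1 then 0
  else
    if ((if FX == 1 then (0:Int) else 1) == 0
          || PySem.List.pyGetD (PySem.List.pyGetD sm (iy:Int) []) ((k:Int) - 1) 0 == 1)
        && (if pvYc FX FY == 0 then true
            else decide (0 < pvW sm FX FY k)
              && decide (0 < PySem.List.pyGetD (pvPref sm iy) ((k:Int) + pvW sm FX FY k) 0
                  - PySem.List.pyGetD (pvPref sm iy) (k:Int) 0)) then 0
    else 1

lemma pvRowFold2 (t u : Nat → Bool) (n : Nat) :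
    (List.range n).foldl (fun r k => if t k then (if u k then r.set k 1 else r) else r)
        (List.replicate n (0:Int))
      = (List.range n).map (fun k => if t k && u k then (1:Int) else 0) := by
  have hfun : (fun (r : List Int) k => if t k then (if u k then r.set k 1 else r) else r)
      = (fun r k => if (t k && u k) then r.set k 1 else r) := by
    funext r k; by_cases h1 : t k <;> by_cases h2 : u k <;> simp [h1, h2]
  rw [hfun, pvRowFold]

lemma pvFoldAppendIf {γ : Type} (c : γ → Bool) (f g : γ → Int) (l : List γ) :
    l.foldl (fun acc x => if c x then acc ++ [f x] else acc ++ [g x]) []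
      = l.map (fun x => if c x then f x else g x) := by
  have hfun : (fun (acc : List Int) x => if c x then acc ++ [f x] else acc ++ [g x])
      = fun acc x => acc ++ [if c x then f x else g x] := by
    funext acc x; by_cases h : c x <;> simp [h]
  rw [hfun, PySem.List.foldl_append_singleton_eq_map]
  simp

lemma pvAeq (sm : List (List Int)) (FX FY : Int)
    (hne : (FX == 1 && FY == 1) = false) :
    linewise_edges_map sm FX FY
      = (List.range sm.length).map (fun iy =>
          (List.range (sm.headD []).length).map (fun k =>
            if pvT sm iy k && pvU sm FX FY iy k then (1:Int) else 0)) := by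
  simp only [linewise_edges_map, hne, Bool.false_eq_true, if_false]
  rw [PySem.List.pyRange_zero_natCast, PySem.List.pyRange_zero_natCast]
  rw [List.foldl_map]
  simp only [List.foldl_map, Int.toNat_natCast, List.map_map, Function.comp_def,
    List.map_const', List.length_range, List.length_map]
  refine Eq.trans (pvOuterFold _
    (fun iy r => (List.range (sm.headD []).length).foldl
      (fun r k => if pvT sm iy k then (if pvU sm FX FY iy k then r.set k 1 else r) else r) r)
    (List.replicate sm.length (List.replicate (sm.headD []).length (0:Int))) sm.length
    (by simp) ?_) ?_
  · intro L iy hL hiy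
    exact pvInnerSet (fun k => pvT sm iy k) (fun k => pvU sm FX FY iy k)
      (List.range (sm.headD []).length) L iy (by rw [hL, List.length_replicate]; exact hiy)
  · rw [List.length_replicate]
    apply List.map_congr_left
    intro iy hiy
    rw [List.mem_range] at hiy
    rw [if_pos hiy]
    rw [List.getD_eq_getElem _ _ (by rw [List.length_replicate]; exact hiy), List.getElem_replicate]
    exact pvRowFold2 (fun k => pvT sm iy k) (fun k => pvU sm FX FY iy k) (sm.headD []).length

lemma pvBeq (sm : List (List Int)) (FX FY : Int)
    (h0 : sm ≠ []) (hrow : ∀ row ∈ sm, (sm.headD []).length ≤ row.length)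
    (hne : (FX == 1 && FY == 1) = false) :
    linewise_edges_map_alt sm FX FY
      = (List.range sm.length).map (fun iy =>
          (List.range (sm.headD []).length).map (fun k => pvCellB sm FX FY iy k)) := by
  simp only [linewise_edges_map_alt, hne, Bool.false_eq_true, if_false]
  rw [PySem.List.pyRange_zero_natCast (sm.length), List.foldl_map,
    PySem.List.foldl_append_singleton_eq_map, List.nil_append]
  apply List.map_congr_left
  intro iy hiy
  rw [List.mem_range] at hiy
  have habove : PySem.List.pyGetD sm ((iy:Int)-1) [] ∈ sm := by
    apply PySem.List.pyGetD_mem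
    have : 0 < sm.length := List.length_pos_of_ne_nil h0
    simp only [PySem.Raise.InRange]
    omega
  have hlen : (sm.headD []).length ≤ (PySem.List.pyGetD sm ((iy:Int)-1) []).length :=
    hrow _ habove
  rw [pvPrefFold _ _ hlen]
  rw [PySem.List.pyRange_zero_natCast ((sm.headD []).length), List.foldl_map]
  rw [pvFoldAppendIf]
  rfl

lemma pvWle (sm : List (List Int)) (FX FY : Int) (k : Nat)
    (hk : k < (sm.headD []).length) (hw : 0 < pvW sm FX FY k) :
    (k:Int) + pvW sm FX FY k ≤ ((sm.headD []).length : Int) := by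
  have hn : (k:Int) < ((sm.headD []).length : Int) := by exact_mod_cast hk
  unfold pvW at hw ⊢
  have hyc1 : pvYc FX FY ≤ 1 ∨ pvYc FX FY = FX := by
    unfold pvYc; split_ifs <;> omega
  split_ifs at hw ⊢ with h
  · omega
  · simp only [Bool.and_eq_true, decide_eq_true_eq, not_and] at h
    rcases hyc1 with hy | hy
    · omega
    · by_cases h3 : 1 < pvYc FX FY
      · have h4 := h h3; omega
      · omega

lemma pvYvEq (sm : List (List Int)) (FX FY : Int) (iy k : Nat)
    (h0 : sm ≠ []) (hrow : ∀ row ∈ sm, (sm.headD []).length ≤ row.length)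
    (hiy : iy < sm.length) (hk : k < (sm.headD []).length) :
    pvYv sm FX FY iy k
      = (if (if pvYc FX FY == 0 then true
             else decide (0 < pvW sm FX FY k)
               && decide (0 < PySem.List.pyGetD (pvPref sm iy) ((k:Int) + pvW sm FX FY k) 0
                   - PySem.List.pyGetD (pvPref sm iy) (k:Int) 0)) then 1 else 0) := by
  have habove : PySem.List.pyGetD sm ((iy:Int)-1) [] ∈ sm := by
    apply PySem.List.pyGetD_mem
    have : 0 < sm.length := List.length_pos_of_ne_nil h0
    simp only [PySem.Raise.InRange]
    omega
  have hlen : (sm.headD []).length ≤ (PySem.List.pyGetD sm ((iy:Int)-1) []).length :=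
    hrow _ habove
  set above := PySem.List.pyGetD sm ((iy:Int)-1) [] with habove_def
  set n := (sm.headD []).length with hn_def
  unfold pvYv
  by_cases hyc : (pvYc FX FY == 0) = true
  · have hz : pvYc FX FY = 0 := by simpa using hyc
    rw [hz]
    simp
  · have hz : ¬ pvYc FX FY = 0 := by simpa using hyc
    rw [if_pos (show (pvYc FX FY != 0) = true by simpa [bne_iff_ne] using hz), if_neg hyc,
      pvFoldlIfOne]
    by_cases hw : 0 < pvW sm FX FY k
    · have hwle : (k:Int) + pvW sm FX FY k ≤ (n:Int) := pvWle sm FX FY k hk hw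
      have hp1 : PySem.List.pyGetD (pvPref sm iy) ((k:Int) + pvW sm FX FY k) 0
          = pvCnt above (k + (pvW sm FX FY k).toNat) := by
        unfold pvPref
        rw [PySem.List.pyGetD_map_pyRange_of_nonneg _ _ _ _ (by omega) (by omega)]
        congr 1
        omega
      have hp2 : PySem.List.pyGetD (pvPref sm iy) (k:Int) 0 = pvCnt above k := by
        unfold pvPref
        rw [PySem.List.pyGetD_map_pyRange_of_nonneg _ _ _ _ (by omega) (by omega)]
        simp [← habove_def]
      rw [hp1, hp2]
      have hcnt := pvCntWindow above k (pvW sm FX FY k).toNat (by omega)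
      suffices hsuff : ((PySem.List.pyRange 0 (pvW sm FX FY k) 1).any fun ex =>
          PySem.List.pyGetD above ((k:Int) + ex) 0 == 1)
          = (decide (0 < pvW sm FX FY k)
            && decide (0 < pvCnt above (k + (pvW sm FX FY k).toNat) - pvCnt above k)) by
        rw [hsuff]
      rw [Bool.eq_iff_iff]
      simp only [List.any_eq_true, PySem.List.mem_pyRange_one, Bool.and_eq_true,
        decide_eq_true_eq]
      constructor
      · rintro ⟨ex, ⟨hex0, hexw⟩, hp⟩
        refine ⟨hw, ?_⟩
        rw [hcnt]
        refine ⟨ex.toNat, by omega, ?_⟩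
        rw [PySem.List.pyGetD_eq_getElem _ _ (by omega) (by omega)] at hp
        have hx : ((k:Int) + ex).toNat = k + ex.toNat := by omega
        simpa [hx] using hp
      · rintro ⟨-, hpos⟩
        rw [hcnt] at hpos
        obtain ⟨j, hj, hp⟩ := hpos
        refine ⟨(j:Int), ⟨by omega, by omega⟩, ?_⟩
        rw [PySem.List.pyGetD_eq_getElem _ _ (by omega) (by omega)]
        have hx : ((k:Int) + (j:Int)).toNat = k + j := by omega
        simpa [hx] using hp
    · rw [PySem.List.pyRange_one_eq_nil (by omega)]
      simp [hw]

lemma pvXvEq (sm : List (List Int)) (FX : Int) (iy k : Nat) :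
    pvXv sm FX iy k
      = (if ((if FX == 1 then (0:Int) else 1) == 0
            || PySem.List.pyGetD (PySem.List.pyGetD sm (iy:Int) []) ((k:Int) - 1) 0 == 1)
         then 1 else 0) := by
  unfold pvXv
  by_cases hfx : (FX == 1) = true
  · simp [hfx]
  · by_cases hl : (PySem.List.pyGetD (PySem.List.pyGetD sm (iy:Int) []) ((k:Int) - 1) 0 == 1) = true <;>
      simp [hfx, hl]

lemma pvLand01 (A B : Bool) :
    (if Int.land (if A then (1:Int) else 0) (if B then (1:Int) else 0) == 0 then (1:Int) else 0)
      = if A && B then 0 else 1 := by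
  cases A <;> cases B <;> decide

lemma pvCellEq (sm : List (List Int)) (FX FY : Int) (iy k : Nat)
    (h0 : sm ≠ []) (hrow : ∀ row ∈ sm, (sm.headD []).length ≤ row.length)
    (hiy : iy < sm.length) (hk : k < (sm.headD []).length) :
    (if pvT sm iy k && pvU sm FX FY iy k then (1:Int) else 0) = pvCellB sm FX FY iy k := by
  unfold pvCellB
  by_cases ht : (PySem.List.pyGetD (PySem.List.pyGetD sm (iy:Int) []) (k:Int) 0 == 1) = true
  · simp only [pvT, pvU, ht, Bool.true_and, bne, Bool.not_true, Bool.false_eq_true, if_false]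
    rw [pvXvEq, pvYvEq sm FX FY iy k h0 hrow hiy hk]
    exact pvLand01 _ _
  · have hT : pvT sm iy k = false := eq_false_of_ne_true ht
    rw [if_pos (show (PySem.List.pyGetD (PySem.List.pyGetD sm (iy:Int) []) (k:Int) 0 != 1) = true
        by simp [bne]; simpa using ht), hT, Bool.false_and]
    simp

-- ===== VERDICT (by name: the statement is the Claim_ definition above) =====
theorem linewise_edges_map_spec : Claim_equal_linewise_edges_map := by
  intro sm FX FY hdom hpre
  unfold Spec_linewise_edges_map
  by_cases hb : (FX == 1 && FY == 1) = true
  · simp [linewise_edges_map, linewise_edges_map_alt, hb]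
  · have hne := eq_false_of_ne_true hb
    by_cases h0 : sm = []
    · subst h0
      simp [linewise_edges_map, linewise_edges_map_alt, hne, PySem.List.pyRange_one_eq_nil]
    · rw [pvAeq sm FX FY hne, pvBeq sm FX FY h0 hpre hne]
      apply List.map_congr_left
      intro iy hiy
      apply List.map_congr_left
      intro k hk
      exact pvCellEq sm FX FY iy k h0 hpre (List.mem_range.mp hiy) (List.mem_range.mp hk)
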